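-- pv_equiv track=rewrite | github.com/synvo-ai/FileGram | bench/filegramos/fingerprint.py | detect_absences
-- ===== SOURCE A (Python) =====
-- from typing import Any
--
-- def detect_absences(per_trajectory_features: list[dict[str, Any]]) -> list[str]:
--     """Detect consistently absent behaviors across all trajectories.
--
--     Returns human-readable absence descriptions.
--     """
--     if not per_trajectory_features:
--         return []
--
--     absences = []
--     n = len(per_trajectory_features)
--
--     # Never created directories
--     if all(f.get("directory_style", {}).get("dirs_created", 0) == 0 for f in per_trajectory_features):
--         absences.append(f"Never created directories in any of {n} trajectories")
--
--     # Never used search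
--     if all(f.get("reading_strategy", {}).get("total_searches", 0) == 0 for f in per_trajectory_features):
--         absences.append(f"Never used search tools in any of {n} trajectories")
--
--     # Never edited files
--     if all(f.get("edit_strategy", {}).get("total_edits", 0) == 0 for f in per_trajectory_features):
--         absences.append(f"Never edited files after creation in any of {n} trajectories")
--
--     # Never created backups
--     if all(f.get("version_strategy", {}).get("backup_copies", 0) == 0 for f in per_trajectory_features):
--         absences.append(f"Never created backup copies in any of {n} trajectories")
--
--     # Never deleted files
--     if all(f.get("version_strategy", {}).get("total_deletes", 0) == 0 for f in per_trajectory_features):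
--         absences.append(f"Never deleted files in any of {n} trajectories")
--
--     # Never browsed directories
--     if all(f.get("reading_strategy", {}).get("total_browses", 0) == 0 for f in per_trajectory_features):
--         absences.append(f"Never browsed directories in any of {n} trajectories")
--
--     # Never created images or structured data
--     if all(
--         f.get("cross_modal_behavior", {}).get("image_files_created", 0) == 0
--         and f.get("cross_modal_behavior", {}).get("structured_files_created", 0) == 0
--         for f in per_trajectory_features
--     ):
--         absences.append(f"Never created image or structured data files in any of {n} trajectories")
--
--     return absences
-- ===== SOURCE B (Python) =====
-- def detect_absences(per_trajectory_features):
--     """Detect consistently absent behaviors across all trajectories.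
--
--     Single pass: AND seven boolean flags over the list, then emit messages.
--     """
--     if not per_trajectory_features:
--         return []
--
--     no_dirs = no_search = no_edits = no_backups = no_deletes = no_browses = no_media = True
--     for f in per_trajectory_features:
--         no_dirs = no_dirs and f.get("directory_style", {}).get("dirs_created", 0) == 0
--         no_search = no_search and f.get("reading_strategy", {}).get("total_searches", 0) == 0
--         no_edits = no_edits and f.get("edit_strategy", {}).get("total_edits", 0) == 0
--         no_backups = no_backups and f.get("version_strategy", {}).get("backup_copies", 0) == 0
--         no_deletes = no_deletes and f.get("version_strategy", {}).get("total_deletes", 0) == 0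
--         no_browses = no_browses and f.get("reading_strategy", {}).get("total_browses", 0) == 0
--         no_media = no_media and (
--             f.get("cross_modal_behavior", {}).get("image_files_created", 0) == 0
--             and f.get("cross_modal_behavior", {}).get("structured_files_created", 0) == 0
--         )
--
--     n = len(per_trajectory_features)
--     absences = []
--     if no_dirs:
--         absences.append(f"Never created directories in any of {n} trajectories")
--     if no_search:
--         absences.append(f"Never used search tools in any of {n} trajectories")
--     if no_edits:
--         absences.append(f"Never edited files after creation in any of {n} trajectories")
--     if no_backups:
--         absences.append(f"Never created backup copies in any of {n} trajectories")
--     if no_deletes: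
--         absences.append(f"Never deleted files in any of {n} trajectories")
--     if no_browses:
--         absences.append(f"Never browsed directories in any of {n} trajectories")
--     if no_media:
--         absences.append(f"Never created image or structured data files in any of {n} trajectories")
--     return absences
-- ===== Notes on version B (the rewrite author's own statement) =====
-- stated objective: alternative
-- what changed: Seven separate all(...) generator passes over the list are fused into a single loop that maintains seven boolean flags, with the messages emitted afterwards from the flags.
import Mathlib
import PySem

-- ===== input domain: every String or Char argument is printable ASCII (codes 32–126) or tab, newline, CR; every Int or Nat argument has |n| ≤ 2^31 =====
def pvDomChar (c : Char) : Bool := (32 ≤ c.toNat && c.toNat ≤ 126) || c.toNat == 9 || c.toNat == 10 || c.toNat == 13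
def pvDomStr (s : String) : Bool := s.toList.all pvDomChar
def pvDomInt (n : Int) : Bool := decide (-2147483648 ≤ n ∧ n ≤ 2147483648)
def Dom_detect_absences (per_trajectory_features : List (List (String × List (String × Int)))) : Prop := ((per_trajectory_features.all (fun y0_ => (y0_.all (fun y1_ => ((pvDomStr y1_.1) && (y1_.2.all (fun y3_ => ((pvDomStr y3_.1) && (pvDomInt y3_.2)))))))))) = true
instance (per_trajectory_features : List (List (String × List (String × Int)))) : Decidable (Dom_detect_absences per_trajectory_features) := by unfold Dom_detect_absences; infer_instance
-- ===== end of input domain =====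

-- B fuses A's seven separate all(...) passes into one loop maintaining seven boolean flags (objective: alternative).

-- shared helper: the Python expression f.get(k1, {}).get(k2, 0), identical in both sources
def pvFGet (f : List (String × List (String × Int))) (k1 k2 : String) : Int :=
  PySem.Dict.getD (PySem.Dict.mk (PySem.Dict.getD (PySem.Dict.mk f) k1 [])) k2 0

-- ===== PORT A =====
def detect_absences (per_trajectory_features : List (List (String × List (String × Int)))) : List String :=
  if per_trajectory_features = [] then []
  else
    let n : Int := per_trajectory_features.length
    let absences : List String := []
    let absences := if per_trajectory_features.all (fun f => pvFGet f "directory_style" "dirs_created" == 0)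
      then absences ++ ["Never created directories in any of " ++ PySem.Int.toStr n ++ " trajectories"] else absences
    let absences := if per_trajectory_features.all (fun f => pvFGet f "reading_strategy" "total_searches" == 0)
      then absences ++ ["Never used search tools in any of " ++ PySem.Int.toStr n ++ " trajectories"] else absences
    let absences := if per_trajectory_features.all (fun f => pvFGet f "edit_strategy" "total_edits" == 0)
      then absences ++ ["Never edited files after creation in any of " ++ PySem.Int.toStr n ++ " trajectories"] else absences
    let absences := if per_trajectory_features.all (fun f => pvFGet f "version_strategy" "backup_copies" == 0)
      then absences ++ ["Never created backup copies in any of " ++ PySem.Int.toStr n ++ " trajectories"] else absences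
    let absences := if per_trajectory_features.all (fun f => pvFGet f "version_strategy" "total_deletes" == 0)
      then absences ++ ["Never deleted files in any of " ++ PySem.Int.toStr n ++ " trajectories"] else absences
    let absences := if per_trajectory_features.all (fun f => pvFGet f "reading_strategy" "total_browses" == 0)
      then absences ++ ["Never browsed directories in any of " ++ PySem.Int.toStr n ++ " trajectories"] else absences
    let absences := if per_trajectory_features.all (fun f =>
        pvFGet f "cross_modal_behavior" "image_files_created" == 0
          && pvFGet f "cross_modal_behavior" "structured_files_created" == 0)
      then absences ++ ["Never created image or structured data files in any of " ++ PySem.Int.toStr n ++ " trajectories"] else absences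
    absences

-- ===== PORT B =====
def detect_absences_alt (per_trajectory_features : List (List (String × List (String × Int)))) : List String :=
  if per_trajectory_features = [] then []
  else
    let flags : Bool × Bool × Bool × Bool × Bool × Bool × Bool :=
      per_trajectory_features.foldl (fun fl f =>
        (fl.1 && (pvFGet f "directory_style" "dirs_created" == 0),
         fl.2.1 && (pvFGet f "reading_strategy" "total_searches" == 0),
         fl.2.2.1 && (pvFGet f "edit_strategy" "total_edits" == 0),
         fl.2.2.2.1 && (pvFGet f "version_strategy" "backup_copies" == 0),
         fl.2.2.2.2.1 && (pvFGet f "version_strategy" "total_deletes" == 0),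
         fl.2.2.2.2.2.1 && (pvFGet f "reading_strategy" "total_browses" == 0),
         fl.2.2.2.2.2.2 && (pvFGet f "cross_modal_behavior" "image_files_created" == 0
            && pvFGet f "cross_modal_behavior" "structured_files_created" == 0)))
        (true, true, true, true, true, true, true)
    let n : Int := per_trajectory_features.length
    let absences : List String := []
    let absences := if flags.1 then absences ++ ["Never created directories in any of " ++ PySem.Int.toStr n ++ " trajectories"] else absences
    let absences := if flags.2.1 then absences ++ ["Never used search tools in any of " ++ PySem.Int.toStr n ++ " trajectories"] else absences
    let absences := if flags.2.2.1 then absences ++ ["Never edited files after creation in any of " ++ PySem.Int.toStr n ++ " trajectories"] else absences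
    let absences := if flags.2.2.2.1 then absences ++ ["Never created backup copies in any of " ++ PySem.Int.toStr n ++ " trajectories"] else absences
    let absences := if flags.2.2.2.2.1 then absences ++ ["Never deleted files in any of " ++ PySem.Int.toStr n ++ " trajectories"] else absences
    let absences := if flags.2.2.2.2.2.1 then absences ++ ["Never browsed directories in any of " ++ PySem.Int.toStr n ++ " trajectories"] else absences
    let absences := if flags.2.2.2.2.2.2 then absences ++ ["Never created image or structured data files in any of " ++ PySem.Int.toStr n ++ " trajectories"] else absences
    absences

-- ===== PRECONDITION & SPEC =====
def Spec_detect_absences (per_trajectory_features : List (List (String × List (String × Int)))) (out : List String) : Prop := out = detect_absences_alt per_trajectory_features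
instance (per_trajectory_features : List (List (String × List (String × Int)))) (out : List String) : Decidable (Spec_detect_absences per_trajectory_features out) := by unfold Spec_detect_absences; infer_instance

-- ===== CLAIM (what is proved, stated in full; the proofs are below) =====
def Claim_equal_detect_absences : Prop := ∀ (per_trajectory_features : List (List (String × List (String × Int)))), Dom_detect_absences per_trajectory_features → Spec_detect_absences per_trajectory_features (detect_absences per_trajectory_features)

-- ===== LEMMAS AND PROOFS =====

-- the fused fold computes the seven all-checks at once
theorem foldl_seven_flags {α : Type} (c1 c2 c3 c4 c5 c6 c7 : α → Bool) (p : List α)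
    (b1 b2 b3 b4 b5 b6 b7 : Bool) :
    p.foldl (fun (fl : Bool × Bool × Bool × Bool × Bool × Bool × Bool) f =>
        (fl.1 && c1 f, fl.2.1 && c2 f, fl.2.2.1 && c3 f, fl.2.2.2.1 && c4 f,
         fl.2.2.2.2.1 && c5 f, fl.2.2.2.2.2.1 && c6 f, fl.2.2.2.2.2.2 && c7 f))
      (b1, b2, b3, b4, b5, b6, b7)
    = (b1 && p.all c1, b2 && p.all c2, b3 && p.all c3, b4 && p.all c4,
       b5 && p.all c5, b6 && p.all c6, b7 && p.all c7) := by
  induction p generalizing b1 b2 b3 b4 b5 b6 b7 with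
  | nil => simp
  | cons x xs ih => simp [List.foldl_cons, ih, Bool.and_assoc]

-- ===== VERDICT (by name: the statement is the Claim_ definition above) =====
theorem detect_absences_spec : Claim_equal_detect_absences := by
  intro p _
  unfold Spec_detect_absences detect_absences detect_absences_alt
  by_cases h : p = [] <;> simp only [h, if_true, if_false]
  rw [foldl_seven_flags]
  simp
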